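-- pv_equiv track=rewrite | github.com/Vfisa/dbt-debugger | app.py | extract_timing
-- ===== SOURCE A (Python) =====
-- def extract_timing(row):
--     """
--     Function to extract values from JSON objects in the "timing" column
--     """
--     compile_started_at = ''
--     compile_completed_at = ''
--     execute_started_at = ''
--     execute_completed_at = ''
--     for item in row:
--         if item['name'] == 'compile':
--             compile_started_at = item['started_at']
--             compile_completed_at = item['completed_at']
--         elif item['name'] == 'execute':
--             execute_started_at = item['started_at']
--             execute_completed_at = item['completed_at']
--     return compile_started_at, compile_completed_at, execute_started_at, execute_completed_at
-- ===== SOURCE B (Python) =====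
-- def extract_timing(row):
--     """
--     Function to extract values from JSON objects in the "timing" column
--     """
--     def last(name):
--         # scan back-to-front and return the first (i.e. last-in-row) matching item's timestamps
--         for item in reversed(row):
--             if item['name'] == name:
--                 return item['started_at'], item['completed_at']
--         return '', ''
--
--     cs, cc = last('compile')
--     es, ec = last('execute')
--     return cs, cc, es, ec
-- ===== Notes on version B (the rewrite author's own statement) =====
-- stated objective: alternative
-- what changed: Replaces A's single forward pass carrying four mutable fields with two independent back-to-front scans that early-return the first (i.e. last-in-row) matching item's timestamps.
import Mathlib
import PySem

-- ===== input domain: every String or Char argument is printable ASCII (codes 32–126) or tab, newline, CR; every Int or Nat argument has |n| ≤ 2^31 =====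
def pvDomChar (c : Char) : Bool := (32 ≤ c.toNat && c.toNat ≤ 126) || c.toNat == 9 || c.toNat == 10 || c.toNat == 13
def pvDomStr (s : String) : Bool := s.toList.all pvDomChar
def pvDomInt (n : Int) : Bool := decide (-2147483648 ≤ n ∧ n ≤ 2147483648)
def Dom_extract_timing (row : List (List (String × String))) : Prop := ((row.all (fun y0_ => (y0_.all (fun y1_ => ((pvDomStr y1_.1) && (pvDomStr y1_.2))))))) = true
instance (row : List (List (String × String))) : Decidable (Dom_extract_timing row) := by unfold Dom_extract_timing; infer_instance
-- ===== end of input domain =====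

-- B replaces A's single forward pass over four mutable fields with two independent
-- back-to-front scans, each early-returning the first (= last-in-row) matching item's timestamps.
-- Equal return values on Pre_ (the inputs where Python A raises no KeyError).

-- ===== PORT A =====
-- one loop step of A: branch on item['name'] and overwrite the matching pair of state fields
def etStep (st : String × String × String × String) (item : List (String × String)) :
    String × String × String × String :=
  let n := (item.lookup "name").getD ""
  if n = "compile" then
    ((item.lookup "started_at").getD "", (item.lookup "completed_at").getD "", st.2.2.1, st.2.2.2)
  else if n = "execute" then
    (st.1, st.2.1, (item.lookup "started_at").getD "", (item.lookup "completed_at").getD "")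
  else st

def extract_timing (row : List (List (String × String))) : String × String × String × String :=
  row.foldl etStep ("", "", "", "")

-- ===== PORT B =====
-- B's `last(name)` loop over `reversed(row)`: scan until the first matching item, else ('','')
def etLast (l : List (List (String × String))) (name : String) : String × String :=
  match l with
  | [] => ("", "")
  | item :: rest =>
    if (item.lookup "name").getD "" = name then
      ((item.lookup "started_at").getD "", (item.lookup "completed_at").getD "")
    else etLast rest name

def extract_timing_alt (row : List (List (String × String))) : String × String × String × String :=
  let r := row.reverse
  let c := etLast r "compile"
  let e := etLast r "execute"
  (c.1, c.2, e.1, e.2)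

-- ===== PRECONDITION & SPEC =====
-- Pre_ excludes exactly the inputs on which Python A raises KeyError: an item without 'name',
-- or a 'compile'/'execute' item missing 'started_at' or 'completed_at'.
def Pre_extract_timing (row : List (List (String × String))) : Prop :=
  ∀ item ∈ row, (item.lookup "name").isSome = true ∧
    ((item.lookup "name" = some "compile" ∨ item.lookup "name" = some "execute") →
      (item.lookup "started_at").isSome = true ∧ (item.lookup "completed_at").isSome = true)
instance (row : List (List (String × String))) : Decidable (Pre_extract_timing row) := by
  unfold Pre_extract_timing; infer_instance

def pvWitness_extract_timing : (List (List (String × String))) :=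
  [[("name", "compile"), ("started_at", "a"), ("completed_at", "b")],
   [("name", "execute"), ("started_at", "c"), ("completed_at", "d")]]

def Spec_extract_timing (row : List (List (String × String))) (out : String × String × String × String) : Prop := out = extract_timing_alt row
instance (row : List (List (String × String))) (out : String × String × String × String) : Decidable (Spec_extract_timing row out) := by unfold Spec_extract_timing; infer_instance

-- ===== CLAIM (what is proved, stated in full; the proofs are below) =====
def Claim_equal_extract_timing : Prop := ∀ (row : List (List (String × String))), Dom_extract_timing row → Pre_extract_timing row → Spec_extract_timing row (extract_timing row)

-- ===== LEMMAS AND PROOFS =====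

-- one-step unfolding of B's scan
lemma etLast_cons (item : List (String × String)) (rest : List (List (String × String)))
    (name : String) :
    etLast (item :: rest) name =
      if (item.lookup "name").getD "" = name then
        ((item.lookup "started_at").getD "", (item.lookup "completed_at").getD "")
      else etLast rest name := rfl

-- A's fold, rewritten as a foldr over the reversed list, computes exactly B's two scans
lemma etFoldr (l : List (List (String × String))) :
    List.foldr (fun item st => etStep st item) ("", "", "", "") l =
      ((etLast l "compile").1, (etLast l "compile").2,
       (etLast l "execute").1, (etLast l "execute").2) := by
  induction l with
  | nil => rfl
  | cons item rest ih =>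
    rw [List.foldr_cons, ih, etLast_cons, etLast_cons]
    unfold etStep
    by_cases hc : (item.lookup "name").getD "" = "compile"
    · rw [if_pos hc, if_pos hc, if_neg (by rw [hc]; decide)]
    · by_cases he : (item.lookup "name").getD "" = "execute"
      · rw [if_neg hc, if_pos he, if_neg hc, if_pos he]
      · rw [if_neg hc, if_neg he, if_neg hc, if_neg he]

-- ===== VERDICT (by name: the statement is the Claim_ definition above) =====
theorem extract_timing_spec : Claim_equal_extract_timing := by
  intro row _ _
  show extract_timing row = extract_timing_alt row
  unfold extract_timing extract_timing_alt
  rw [← List.foldr_reverse, etFoldr]
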